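-- pv_equiv track=rewrite | github.com/jahirulislammolla/CodeFights | BotChallenges/Quora/questionCorrectionBot.py | questionCorrectionBot
-- ===== SOURCE A (Python) =====
-- def questionCorrectionBot(question):
--     a=", ".join([i.strip() for i in question.strip().split(",")])
--     x=""
--     c=0
--     for i in a:
--         if (i==" " or i=="?") and c==0:
--             x+=i
--             c=1
--         elif i not in "? ":
--             x+=i
--             c=0
--         else:
--             c=1
--     if x[-1]!="?":
--         x+="?"
--     return x[0].upper()+x[1:]
-- ===== SOURCE B (Python) =====
-- def questionCorrectionBot(question):
--     x = ", ".join(p.strip() for p in question.strip().split(","))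
--     # collapse runs of spaces/question marks by skipping the rest of each run
--     out = []
--     i = 0
--     n = len(x)
--     while i < n:
--         out.append(x[i])
--         i += 1
--         if x[i - 1] in " ?":
--             while i < n and x[i] in " ?":
--                 i += 1
--     y = "".join(out)
--     if y[-1] != "?":
--         y += "?"
--     return y[0].upper() + y[1:]
-- ===== Notes on version B (the rewrite author's own statement) =====
-- stated objective: alternative
-- what changed: Replaced the flag-variable state-machine scan (c toggling 0/1) with a run-skipping loop that emits each character and, when it is a space or '?', skips the remainder of that run; the comma-normalisation and tail steps are kept.
import Mathlib
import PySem

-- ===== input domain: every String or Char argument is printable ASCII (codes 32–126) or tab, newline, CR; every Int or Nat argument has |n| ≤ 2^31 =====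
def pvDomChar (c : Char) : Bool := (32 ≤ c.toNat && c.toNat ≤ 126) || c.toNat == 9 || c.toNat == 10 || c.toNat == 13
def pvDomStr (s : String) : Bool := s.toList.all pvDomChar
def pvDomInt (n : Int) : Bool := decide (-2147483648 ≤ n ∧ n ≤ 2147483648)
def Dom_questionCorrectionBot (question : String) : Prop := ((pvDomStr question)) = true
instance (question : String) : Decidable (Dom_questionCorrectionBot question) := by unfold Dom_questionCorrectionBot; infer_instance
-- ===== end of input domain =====

-- B replaces A's flag-tracking state-machine scan by a run-skipping loop (emit a char, then skip
-- the rest of its run when it is a space/'?'), the same comma step and tail; objective: alternative (same cost).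

-- ===== PORT A =====
-- A's for-loop over `a` with accumulator string x and flag c (c : Int, as in the Python).
def pvStepA (st : List Char × Int) (i : Char) : List Char × Int :=
  if (i = ' ' ∨ i = '?') ∧ st.2 = 0 then (st.1 ++ [i], 1)
  else if ¬ (i = '?' ∨ i = ' ') then (st.1 ++ [i], 0)
  else (st.1, 1)

def questionCorrectionBot (question : String) : String :=
  let a : List Char :=
    PySem.Chars.join (", ".toList)
      ((PySem.Chars.splitOn (PySem.Chars.strip question.toList) [',']).map PySem.Chars.strip)
  let x : List Char := (a.foldl pvStepA ([], 0)).1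
  -- x[-1] raises IndexError on empty x; those inputs are outside Pre_
  let x := if PySem.List.pyGet? x (-1) ≠ some '?' then x ++ ['?'] else x
  match x with
  | [] => ""                      -- unreachable under Pre_ (x[0] would raise)
  | h :: t => String.ofList (PySem.Chars.upperChar h :: t)

-- ===== PORT B =====
-- run-skipping collapse: emit x[i]; if it is in " ?", skip the following run of " ?" chars
def pvCollapseB (xs : List Char) : List Char :=
  match xs with
  | [] => []
  | h :: t =>
    if h = ' ' ∨ h = '?' then
      h :: pvCollapseB (t.dropWhile (fun c => decide (c = ' ' ∨ c = '?')))
    else h :: pvCollapseB t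
termination_by xs.length
decreasing_by
  · exact Nat.lt_succ_of_le (List.length_dropWhile_le _ _)
  · simp

def questionCorrectionBot_alt (question : String) : String :=
  let x : List Char :=
    PySem.Chars.join (", ".toList)
      ((PySem.Chars.splitOn (PySem.Chars.strip question.toList) [',']).map PySem.Chars.strip)
  let y : List Char := pvCollapseB x
  -- y[-1] raises IndexError on empty y; those inputs are outside Pre_
  let y := if PySem.List.pyGet? y (-1) ≠ some '?' then y ++ ['?'] else y
  match y with
  | [] => ""                      -- unreachable under Pre_ (y[0] would raise)
  | h :: t => String.ofList (PySem.Chars.upperChar h :: t)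

-- ===== PRECONDITION & SPEC =====
-- Pre_ excludes whitespace-only inputs, on which both Pythons raise IndexError at x[-1].
def Pre_questionCorrectionBot (question : String) : Prop :=
  PySem.Chars.strip question.toList ≠ []
instance (question : String) : Decidable (Pre_questionCorrectionBot question) := by
  unfold Pre_questionCorrectionBot; infer_instance

def pvWitness_questionCorrectionBot : String := "hello,  world ??"

def Spec_questionCorrectionBot (question : String) (out : String) : Prop := out = questionCorrectionBot_alt question
instance (question : String) (out : String) : Decidable (Spec_questionCorrectionBot question out) := by unfold Spec_questionCorrectionBot; infer_instance

-- ===== CLAIM (what is proved, stated in full; the proofs are below) =====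
def Claim_equal_questionCorrectionBot : Prop := ∀ (question : String), Dom_questionCorrectionBot question → Pre_questionCorrectionBot question → Spec_questionCorrectionBot question (questionCorrectionBot question)

-- ===== LEMMAS AND PROOFS =====

-- A's flag fold equals B's run-skipping collapse (one statement for both flag values).
theorem pvFold_eq_collapse (xs : List Char) : ∀ (acc : List Char) (c : Int),
    (xs.foldl pvStepA (acc, c)).1 =
      acc ++ pvCollapseB (if c = 0 then xs else xs.dropWhile (fun ch => decide (ch = ' ' ∨ ch = '?'))) := by
  induction xs with
  | nil =>
    intro acc c
    split <;> simp [pvCollapseB]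
  | cons h t ih =>
    intro acc c
    have hor : (h = ' ' ∨ h = '?') ↔ (h = '?' ∨ h = ' ') := by tauto
    by_cases hk : h = ' ' ∨ h = '?'
    · have hk2 := hor.mp hk
      by_cases hc : c = 0 <;>
        simp [pvStepA, hk, hk2, hc, ih, pvCollapseB, List.dropWhile]
    · have hk2 := hor.not.mp hk
      by_cases hc : c = 0 <;>
        simp [pvStepA, hk, hk2, hc, ih, pvCollapseB, List.dropWhile]

-- ===== VERDICT (by name: the statement is the Claim_ definition above) =====
theorem questionCorrectionBot_spec : Claim_equal_questionCorrectionBot := by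
  intro question _ _
  unfold Spec_questionCorrectionBot questionCorrectionBot questionCorrectionBot_alt
  simp [pvFold_eq_collapse]
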